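-- pv_equiv track=rewrite | github.com/twodogs-wang/science_calculator_python3 | helper_funcs.py | _Spaces_rearrange
-- ===== SOURCE A (Python) =====
-- def _Spaces_rearrange(_str:str)->str:
--     #this function removes redunt spaces
--
--     _str=_str.strip(' ')
--
--     if not _str:
--         return ''
--     _ans=''
--     _ans+=_str[0]
--
--     for i in range(1,len(_str)):
--         if not _str[i]==' ':
--             _ans+=_str[i]
--         elif _str[i]==' ' and _str[i-1] ==' ':
--             continue
--         else:
--             _ans+=' '
--
--     return _ans
-- ===== SOURCE B (Python) =====
-- def _Spaces_rearrange(_str: str) -> str: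
--     s = _str.strip(' ')
--     return ' '.join(w for w in s.split(' ') if w != '')
-- ===== Notes on version B (the rewrite author's own statement) =====
-- stated objective: faster
-- what changed: Replaces the char-by-char scan with previous-character state (and quadratic string concatenation) by tokenizing: strip spaces, split on single spaces, drop the empty tokens produced by space runs, and join the rest with a single space.
import Mathlib
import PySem

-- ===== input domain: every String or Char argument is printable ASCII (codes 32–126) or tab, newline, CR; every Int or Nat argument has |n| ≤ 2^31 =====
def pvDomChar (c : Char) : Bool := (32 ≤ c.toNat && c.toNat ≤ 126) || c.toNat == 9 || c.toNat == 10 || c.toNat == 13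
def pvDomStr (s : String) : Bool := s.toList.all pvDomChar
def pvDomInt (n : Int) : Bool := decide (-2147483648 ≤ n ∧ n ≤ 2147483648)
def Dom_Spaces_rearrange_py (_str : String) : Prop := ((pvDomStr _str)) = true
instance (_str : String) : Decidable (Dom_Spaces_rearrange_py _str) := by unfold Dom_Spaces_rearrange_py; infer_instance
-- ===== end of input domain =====

-- B replaces A's char-by-char scan (tracking whether the previous char was a space)
-- by tokenizing: strip(' '), split(' '), drop empty tokens, ' '.join the rest.


-- ===== PORT A =====
-- literal transliteration of A: strip ' ', keep the first char, then scan the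
-- indices 1..len-1, appending unless the current and previous chars are both ' '.
-- (the pyGetD default ' ' is never read: every index used is in range)
def Spaces_rearrange_py (_str : String) : String :=
  let s := PySem.Str.stripChars _str " "
  if s == "" then ""
  else
    let cs := s.toList
    let ans : List Char := [PySem.List.pyGetD cs 0 ' ']
    let ans := (PySem.List.pyRange 1 (PySem.Str.len s)).foldl
      (fun ans i =>
        let ci := PySem.List.pyGetD cs i ' '
        if !(ci == ' ') then ans ++ [ci]
        else if ci == ' ' && PySem.List.pyGetD cs (i - 1) ' ' == ' ' then ans
        else ans ++ [' ']) ans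
    String.ofList ans

-- ===== PORT B =====
-- literal transliteration of B: strip ' ', split on ' ', drop empty tokens, join with ' '
def Spaces_rearrange_py_alt (_str : String) : String :=
  let s := PySem.Str.stripChars _str " "
  PySem.Str.join " " (((PySem.Str.split? s " ").getD []).filter (fun w => !(w == "")))

-- ===== PRECONDITION & SPEC =====
def Spec_Spaces_rearrange_py (_str : String) (out : String) : Prop := out = Spaces_rearrange_py_alt _str
instance (_str : String) (out : String) : Decidable (Spec_Spaces_rearrange_py _str out) := by unfold Spec_Spaces_rearrange_py; infer_instance

-- ===== CLAIM (what is proved, stated in full; the proofs are below) =====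
def Claim_equal_Spaces_rearrange_py : Prop := ∀ (_str : String), Dom_Spaces_rearrange_py _str → Spec_Spaces_rearrange_py _str (Spaces_rearrange_py _str)

-- ===== LEMMAS AND PROOFS =====

-- canonical collapse: the state is "was the previous emitted position a space / start"
def pvGo : Bool → List Char → List Char
  | _, [] => []
  | prevSp, c :: rest =>
    if c == ' ' then (if prevSp then pvGo true rest else ' ' :: pvGo true rest)
    else c :: pvGo false rest

-- reference split on a single space, accumulating the current token
def pvSplit : List Char → List Char → List (List Char)
  | pre, [] => [pre]
  | pre, c :: rest => if c == ' ' then pre :: pvSplit [] rest else pvSplit (pre ++ [c]) rest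

theorem pvSplitOn_go_eq (fuel : Nat) : ∀ (l cur : List Char) (acc : List (List Char)), l.length ≤ fuel →
    PySem.Chars.splitOn.go [' '] fuel l cur acc = acc.reverse ++ pvSplit cur.reverse l := by
  induction fuel with
  | zero =>
    intro l cur acc h
    have : l = [] := List.eq_nil_of_length_eq_zero (Nat.le_zero.mp h)
    subst this
    simp [PySem.Chars.splitOn.go, pvSplit]
  | succ n ih =>
    intro l cur acc h
    cases l with
    | nil => simp [PySem.Chars.splitOn.go, pvSplit]
    | cons c rest =>
      by_cases hc : c = ' '
      · subst hc
        rw [show PySem.Chars.splitOn.go [' '] (n+1) (' ' :: rest) cur acc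
              = PySem.Chars.splitOn.go [' '] n rest [] (cur.reverse :: acc) by
            simp [PySem.Chars.splitOn.go, List.isPrefixOf]]
        rw [ih rest [] (cur.reverse :: acc) (by simpa using Nat.succ_le_succ_iff.mp h)]
        simp [pvSplit]
      · rw [show PySem.Chars.splitOn.go [' '] (n+1) (c :: rest) cur acc
              = PySem.Chars.splitOn.go [' '] n rest (c :: cur) acc by
            simp [PySem.Chars.splitOn.go, List.isPrefixOf, Ne.symm hc]]
        rw [ih rest (c :: cur) acc (by simpa using Nat.succ_le_succ_iff.mp h)]
        simp [pvSplit, hc]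

theorem pvSplitOn_eq (t : List Char) :
    PySem.Chars.splitOn t [' '] = pvSplit [] t := by
  have := pvSplitOn_go_eq (t.length + 1) t [] [] (Nat.le_succ _)
  simpa [PySem.Chars.splitOn] using this

-- a split whose current first token is nonempty filters to a nonempty list
theorem pvFilter_split_ne_nil (rs : List Char) : ∀ (pre : List Char), pre ≠ [] →
    (pvSplit pre rs).filter (· ≠ []) ≠ [] := by
  induction rs with
  | nil => intro pre hpre; simp [pvSplit, hpre]
  | cons c rest ih =>
    intro pre hpre
    by_cases hc : c = ' '
    · subst hc; simp [pvSplit, hpre]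
    · simpa [pvSplit, hc] using ih (pre ++ [c]) (by simp)

theorem pvFilter_split_nil_ne_nil (rs : List Char) (h0 : rs ≠ [])
    (hlast : rs.getLast? ≠ some ' ') : (pvSplit [] rs).filter (· ≠ []) ≠ [] := by
  induction rs with
  | nil => exact absurd rfl h0
  | cons c rest ih =>
    by_cases hc : c = ' '
    · subst hc
      cases rest with
      | nil => simp at hlast
      | cons d rs' =>
        have := ih (by simp) (by rwa [List.getLast?_cons_cons] at hlast)
        simpa [pvSplit] using this
    · exact (by simpa [pvSplit, hc] using pvFilter_split_ne_nil rest [c] (by simp))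

-- master lemma: join-filter of pvSplit is the collapse pvGo
theorem pvJoin_filter_split (rest : List Char) (hlast : rest.getLast? ≠ some ' ') :
    ∀ (pre : List Char),
    PySem.Chars.join [' '] ((pvSplit pre rest).filter (· ≠ [])) =
      (if pre = [] then pvGo true rest else pre ++ pvGo false rest) := by
  induction rest with
  | nil =>
    intro pre
    by_cases hp : pre = [] <;>
      simp [pvSplit, pvGo, hp, PySem.Chars.join_nil, PySem.Chars.join_singleton]
  | cons c rest ih =>
    intro pre
    by_cases hc : c = ' '
    · subst hc
      cases rest with
      | nil => simp at hlast
      | cons d rs' =>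
        have hlast' : (d :: rs').getLast? ≠ some ' ' := by
          rwa [List.getLast?_cons_cons] at hlast
        by_cases hp : pre = []
        · subst hp
          have := ih hlast' []
          simpa [pvSplit, pvGo] using this
        · have hne := pvFilter_split_nil_ne_nil (d :: rs') (by simp) hlast'
          obtain ⟨y, L', hL⟩ := List.exists_cons_of_ne_nil hne
          have hIH := ih hlast' []
          rw [hL, if_pos rfl] at hIH
          have hstep : pvSplit pre (' ' :: d :: rs') = pre :: pvSplit [] (d :: rs') := by
            simp [pvSplit]
          rw [hstep, List.filter_cons]
          rw [show (decide (pre ≠ [])) = true by simpa using hp]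
          rw [hL, if_pos rfl, PySem.Chars.join_cons_cons, hIH]
          simp [pvGo, hp]
    · have hlast' : rest.getLast? ≠ some ' ' := by
        cases rest with
        | nil => simp
        | cons d rs' => rwa [List.getLast?_cons_cons] at hlast
      have hIH := ih hlast' (pre ++ [c])
      rw [if_neg (by simp)] at hIH
      have hstep : pvSplit pre (c :: rest) = pvSplit (pre ++ [c]) rest := by
        simp [pvSplit, hc]
      rw [hstep, hIH]
      by_cases hp : pre = [] <;> simp [hp, pvGo, hc]

-- A's index loop computes pvGo on the tail
theorem pvLoopA (cs : List Char) (fuel : Nat) : ∀ (j : Nat) (acc : List Char),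
    1 ≤ j → j ≤ cs.length → cs.length - j ≤ fuel →
    (PySem.List.pyRange (j : Int) (cs.length : Int)).foldl
      (fun ans i =>
        if !(PySem.List.pyGetD cs i ' ' == ' ') then ans ++ [PySem.List.pyGetD cs i ' ']
        else if PySem.List.pyGetD cs i ' ' == ' ' && PySem.List.pyGetD cs (i - 1) ' ' == ' ' then ans
        else ans ++ [' ']) acc
    = acc ++ pvGo (cs.getD (j - 1) ' ' == ' ') (cs.drop j) := by
  induction fuel with
  | zero =>
    intro j acc h1 h2 hf
    have hj : j = cs.length := by omega
    subst hj
    rw [PySem.List.pyRange_one_eq_nil (le_refl _)]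
    simp [pvGo]
  | succ n ih =>
    intro j acc h1 h2 hf
    rcases Nat.lt_or_ge j cs.length with hlt | hge
    · rw [PySem.List.pyRange_one_cons (by exact_mod_cast hlt)]
      rw [List.foldl_cons]
      rw [show ((j : Int) + 1) = ((j + 1 : Nat) : Int) by push_cast; ring]
      rw [ih (j + 1) _ (by omega) (by omega) (by omega)]
      have hgj : PySem.List.pyGetD cs (j : Int) ' ' = cs[j] := by
        rw [PySem.List.pyGetD_natCast, List.getD_eq_getElem _ _ hlt]
      have hgj1 : PySem.List.pyGetD cs ((j : Int) - 1) ' ' = cs.getD (j - 1) ' ' := by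
        rw [show ((j : Int) - 1) = ((j - 1 : Nat) : Int) by omega, PySem.List.pyGetD_natCast]
      have hdrop : cs.drop j = cs[j] :: cs.drop (j + 1) := List.drop_eq_getElem_cons hlt
      have hgd : cs.getD (j + 1 - 1) ' ' = cs[j] := by
        simp [List.getD, List.getElem?_eq_getElem hlt]
      rw [hgd, hdrop]
      simp only [hgj, hgj1]
      by_cases hc : cs[j] = ' '
      · by_cases hprev : cs[j - 1]?.getD ' ' = ' ' <;>
          simp [pvGo, hc, hprev, List.getD]
      · simp [pvGo, hc]
        rw [show (cs[j] == ' ') = false by simp [hc]]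
    · have hj : j = cs.length := by omega
      subst hj
      rw [PySem.List.pyRange_one_eq_nil (le_refl _)]
      simp [pvGo]

-- stripped strings do not begin or end with a space
theorem pvHead?_dropWhile {p : Char → Bool} : ∀ (l : List Char) {c : Char},
    (l.dropWhile p).head? = some c → p c = false := by
  intro l c h
  cases hd : l.dropWhile p with
  | nil => rw [hd] at h; simp at h
  | cons a tl =>
    rw [hd] at h
    simp at h
    subst h
    have hw := List.head_dropWhile_not p (l := l) (by simp [hd])
    rwa [show (l.dropWhile p).head (by simp [hd]) = a by simp [hd]] at hw

theorem pvGetLast?_dropWhile {p : Char → Bool} : ∀ (l : List Char),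
    l.dropWhile p ≠ [] → (l.dropWhile p).getLast? = l.getLast? := by
  intro l h
  obtain ⟨pre, hpre⟩ := (List.dropWhile_suffix (l := l) (p := p))
  conv_rhs => rw [← hpre]
  rw [List.getLast?_append_of_ne_nil pre h]

theorem pvStrip_head (s : List Char) {c : Char}
    (h : (PySem.Chars.stripChars s [' ']).head? = some c) : c ≠ ' ' := by
  unfold PySem.Chars.stripChars at h
  rw [List.head?_reverse] at h
  set p : Char → Bool := fun c => [' '].contains c with hp
  have hne : (List.dropWhile p (List.dropWhile p s).reverse) ≠ [] := by
    intro hnil; rw [hnil] at h; simp at h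
  rw [pvGetLast?_dropWhile _ hne, List.getLast?_reverse] at h
  have := pvHead?_dropWhile (p := p) s h
  simp [hp] at this
  exact this

theorem pvStrip_last (s : List Char) :
    (PySem.Chars.stripChars s [' ']).getLast? ≠ some ' ' := by
  unfold PySem.Chars.stripChars
  rw [List.getLast?_reverse]
  intro h
  have := pvHead?_dropWhile (p := fun c => [' '].contains c) (List.dropWhile _ s).reverse h
  simp at this

-- pvGo through a cons with non-space head
theorem pvGo_cons_ne {c : Char} (hc : c ≠ ' ') (rest : List Char) :
    pvGo true (c :: rest) = c :: pvGo false rest := by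
  simp [pvGo, hc]

-- B's value on any string, at the char-list level
theorem pvAltChars (x : String) :
    (Spaces_rearrange_py_alt x).toList =
      PySem.Chars.join [' ']
        (((pvSplit [] (PySem.Chars.stripChars x.toList [' '])).filter (· ≠ []))) := by
  unfold Spaces_rearrange_py_alt
  set s := PySem.Str.stripChars x " " with hs
  have hst : s.toList = PySem.Chars.stripChars x.toList [' '] := by
    rw [hs, PySem.Str.toList_stripChars]; rfl
  have hsplit : (PySem.Str.split? s " ").map (List.map String.toList)
      = some (PySem.Chars.splitOn s.toList [' ']) := by
    rw [PySem.Str.split?_map]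
    rw [show (" " : String).toList = [' '] from rfl]
    simp [PySem.Chars.split?]
  obtain ⟨parts, hp1, hp2⟩ := Option.map_eq_some_iff.mp hsplit
  show (PySem.Str.join " " (((PySem.Str.split? s " ").getD []).filter (fun w => !(w == "")))).toList = _
  rw [hp1]
  simp only [Option.getD_some]
  rw [PySem.Str.toList_join]
  rw [show (" " : String).toList = [' '] from rfl]
  congr 1
  rw [← hst, ← pvSplitOn_eq, ← hp2]
  rw [List.filter_map]
  congr 1
  apply List.filter_congr
  intro w _
  simp only [Function.comp]
  by_cases hw : w = ""
  · subst hw; simp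
  · have hwl : ¬ w.toList = [] := by
      intro hnil
      exact hw (String.toList_inj.mp (by simp [hnil]))
    simp [hw, hwl]

-- ===== VERDICT (by name: the statement is the Claim_ definition above) =====
theorem Spaces_rearrange_py_spec : Claim_equal_Spaces_rearrange_py := by
  intro x _
  unfold Spec_Spaces_rearrange_py
  rw [← String.toList_inj]
  rw [pvAltChars]
  unfold Spaces_rearrange_py
  set s := PySem.Str.stripChars x " " with hs
  have hst : s.toList = PySem.Chars.stripChars x.toList [' '] := by
    rw [hs, PySem.Str.toList_stripChars]; rfl
  by_cases he : s = ""
  · rw [if_pos (by simp [he])]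
    have ht : PySem.Chars.stripChars x.toList [' '] = [] := by
      rw [← hst, he]; rfl
    rw [ht]
    simp [pvSplit, PySem.Chars.join_nil]
  · rw [if_neg (by simpa using he)]
    have htne : s.toList ≠ [] := by
      intro h; exact he (String.toList_inj.mp (by simp [h]))
    obtain ⟨c, rest, hcr⟩ := List.exists_cons_of_ne_nil htne
    have hc : c ≠ ' ' := by
      apply pvStrip_head x.toList
      rw [← hst, hcr]; rfl
    have hlast : (PySem.Chars.stripChars x.toList [' ']).getLast? ≠ some ' ' :=
      pvStrip_last x.toList
    rw [pvJoin_filter_split _ hlast [] , if_pos rfl]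
    simp only [String.toList_ofList]
    have hlen : PySem.Str.len s = (s.toList.length : Int) := PySem.Str.len_eq s
    rw [hlen]
    have hA := pvLoopA s.toList (s.toList.length) 1
      [PySem.List.pyGetD s.toList 0 ' '] (le_refl _) (by rw [hcr]; simp) (by omega)
    simp only [Nat.cast_one] at hA
    rw [hA]
    have hget0 : PySem.List.pyGetD s.toList 0 ' ' = c := by
      rw [show ((0:Int)) = ((0:Nat) : Int) by norm_num, PySem.List.pyGetD_natCast, hcr]; rfl
    have hgetd : s.toList.getD (1 - 1) ' ' = c := by rw [hcr]; rfl
    rw [hget0, hgetd, hcr]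
    rw [show (c :: rest).drop 1 = rest from rfl]
    rw [← hst, hcr, pvGo_cons_ne hc]
    rw [show (c == ' ') = false by simp [hc]]
    simp
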